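-- pv_equiv track=rewrite | github.com/MSNYC/svelo | src/svelo/decoders.py | variant_beaufort_encrypt
-- ===== SOURCE A (Python) =====
-- from typing import Callable, List, Optional
--
-- def _clean_key_alpha(key: str) -> str:
--     cleaned = "".join(ch for ch in key.upper() if "A" <= ch <= "Z")
--     if not cleaned:
--         raise ValueError("Key must contain at least one letter A-Z.")
--     return cleaned
--
-- def _alpha_index(ch: str) -> int:
--     return ord(ch) - ord("A")
--
-- def _vigenere_key_stream(text: str, key: str) -> List[int]:
--     shifts = [_alpha_index(ch) for ch in _clean_key_alpha(key)]
--     stream = []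
--     idx = 0
--     for ch in text:
--         if ch.isalpha():
--             stream.append(shifts[idx % len(shifts)])
--             idx += 1
--         else:
--             stream.append(0)
--     return stream
--
-- def variant_beaufort_encrypt(text: str, key: str) -> str:
--     shifts = _vigenere_key_stream(text, key)
--     out = []
--     for ch, shift in zip(text, shifts):
--         if ch.isalpha():
--             base = ord("A") if ch.isupper() else ord("a")
--             idx = ord(ch) - base
--             out.append(chr((idx - shift) % 26 + base))
--         else:
--             out.append(ch)
--     return "".join(out)
-- ===== SOURCE B (Python) =====
-- def variant_beaufort_encrypt(text: str, key: str) -> str: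
--     # Tableau method: precompute one rotated cipher alphabet per key letter,
--     # then encrypt by plain table indexing -- no modular arithmetic in the text loop.
--     ABC = "ABCDEFGHIJKLMNOPQRSTUVWXYZ"
--     shifts = [ord(c) - 65 for c in key.upper() if "A" <= c <= "Z"]
--     if not shifts:
--         raise ValueError("Key must contain at least one letter A-Z.")
--     rows = [ABC[-s:] + ABC[:-s] for s in shifts]
--     n = len(rows)
--     out = []
--     j = 0
--     for ch in text:
--         if "A" <= ch <= "Z":
--             out.append(rows[j % n][ord(ch) - 65])
--             j += 1
--         elif "a" <= ch <= "z":
--             out.append(rows[j % n][ord(ch) - 97].lower())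
--             j += 1
--         else:
--             out.append(ch)
--     return "".join(out)
-- ===== Notes on version B (the rewrite author's own statement) =====
-- stated objective: alternative
-- what changed: Replaces A's per-character modular arithmetic fed by a materialized per-character key stream with the classic tableau method: one rotated cipher alphabet (string) is precomputed per key letter, and the single text loop encrypts by plain table indexing into rows[j % n] with a running key counter; no chr/mod arithmetic and no helper functions remain in the loop.
import Mathlib
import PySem

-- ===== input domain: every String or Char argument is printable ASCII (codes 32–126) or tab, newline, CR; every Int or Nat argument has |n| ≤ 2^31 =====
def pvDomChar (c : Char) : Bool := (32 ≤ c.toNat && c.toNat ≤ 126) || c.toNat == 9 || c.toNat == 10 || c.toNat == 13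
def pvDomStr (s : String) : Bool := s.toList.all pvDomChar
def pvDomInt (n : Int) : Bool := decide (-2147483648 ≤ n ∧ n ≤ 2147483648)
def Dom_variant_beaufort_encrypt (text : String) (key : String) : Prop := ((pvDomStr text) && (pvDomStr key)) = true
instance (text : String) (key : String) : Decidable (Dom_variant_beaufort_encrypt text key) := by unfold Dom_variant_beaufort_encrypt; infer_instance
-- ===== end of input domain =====

-- B replaces A's per-character modular arithmetic (fed by a materialized key stream) with the
-- classic tableau method: precomputed rotated cipher alphabets indexed in a single pass; objective: alternative.

-- ===== PORT A =====
-- _clean_key_alpha without the raise: Pre_ excludes the ValueError case (no A-Z letter in the key)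
def pvCleanKeyA (key : List Char) : List Char :=
  (PySem.Chars.upper key).filter (fun c => decide ('A' ≤ c) && decide (c ≤ 'Z'))

-- _vigenere_key_stream's loop: appends shifts[idx % len] for alphabetic chars, 0 otherwise
def pvStreamA (shifts : List Int) : List Char → Nat → List Int
  | [], _ => []
  | c :: cs, idx =>
    if PySem.Chars.isalpha c then
      shifts.getD (idx % shifts.length) 0 :: pvStreamA shifts cs (idx + 1)
    else
      0 :: pvStreamA shifts cs idx

-- A's main loop over zip(text, shifts)
def pvEncA : List (Char × Int) → List Char
  | [] => []
  | (c, shift) :: rest =>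
    (if PySem.Chars.isalpha c then
      Char.ofNat ((PySem.Int.mod ((c.toNat : Int) - (if PySem.Chars.isupper c then 65 else 97) - shift) 26
        + (if PySem.Chars.isupper c then 65 else 97)).toNat)
    else c) :: pvEncA rest

def variant_beaufort_encrypt (text : String) (key : String) : String :=
  let shifts := (pvCleanKeyA key.toList).map (fun c => (c.toNat : Int) - 65)
  String.mk (pvEncA (text.toList.zip (pvStreamA shifts text.toList 0)))

-- ===== PORT B =====
-- ABC = "ABCDEFGHIJKLMNOPQRSTUVWXYZ"
def pvABC : List Char := ['A','B','C','D','E','F','G','H','I','J','K','L','M','N','O','P','Q','R','S','T','U','V','W','X','Y','Z']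

-- one tableau row: ABC[-s:] + ABC[:-s]
def pvRowB (s : Int) : List Char :=
  PySem.List.slice pvABC (some (-s)) none ++ PySem.List.slice pvABC none (some (-s))

-- B's single text loop: plain table indexing into rows[j % n] with a running key counter j
def pvEncB (rows : List (List Char)) : List Char → Nat → List Char
  | [], _ => []
  | c :: cs, j =>
    if decide ('A' ≤ c) && decide (c ≤ 'Z') then
      (rows.getD (j % rows.length) []).getD (c.toNat - 65) c :: pvEncB rows cs (j + 1)
    else if decide ('a' ≤ c) && decide (c ≤ 'z') then
      PySem.Chars.lowerChar ((rows.getD (j % rows.length) []).getD (c.toNat - 97) c) :: pvEncB rows cs (j + 1)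
    else
      c :: pvEncB rows cs j

def variant_beaufort_encrypt_alt (text : String) (key : String) : String :=
  let shifts := ((PySem.Chars.upper key.toList).filter
      (fun c => decide ('A' ≤ c) && decide (c ≤ 'Z'))).map (fun c => (c.toNat : Int) - 65)
  let rows := shifts.map pvRowB
  String.mk (pvEncB rows text.toList 0)

-- ===== PRECONDITION & SPEC =====
-- Pre_ excludes keys with no letter A-Z/a-z, on which Python A raises ValueError (and B raises too).
def Pre_variant_beaufort_encrypt (text : String) (key : String) : Prop :=
  (key.toList.any PySem.Chars.isalpha) = true
instance (text : String) (key : String) : Decidable (Pre_variant_beaufort_encrypt text key) := by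
  unfold Pre_variant_beaufort_encrypt; infer_instance
def pvWitness_variant_beaufort_encrypt : String × String := ("Hello, World!", "key")

def Spec_variant_beaufort_encrypt (text : String) (key : String) (out : String) : Prop := out = variant_beaufort_encrypt_alt text key
instance (text : String) (key : String) (out : String) : Decidable (Spec_variant_beaufort_encrypt text key out) := by unfold Spec_variant_beaufort_encrypt; infer_instance

-- ===== CLAIM (what is proved, stated in full; the proofs are below) =====
def Claim_equal_variant_beaufort_encrypt : Prop := ∀ (text : String) (key : String), Dom_variant_beaufort_encrypt text key → Pre_variant_beaufort_encrypt text key → Spec_variant_beaufort_encrypt text key (variant_beaufort_encrypt text key)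

-- ===== LEMMAS AND PROOFS =====
lemma charToNat_ofNat (n : Nat) (h : n < 55296) : (Char.ofNat n).toNat = n := by
  unfold Char.ofNat
  rw [dif_pos (Or.inl h)]
  simp [Char.ofNatAux, Char.toNat]

lemma pvABC_get : ∀ k : Fin 26, pvABC.getD (k : Nat) 'A' = Char.ofNat (65 + (k : Nat)) := by decide

lemma pvRowB_eq_rotate (s : Int) (h0 : 0 ≤ s) (h25 : s ≤ 25) :
    pvRowB s = pvABC.rotate (26 - s.toNat) := by
  have hlen2 : pvABC.length = 26 := by decide
  rcases eq_or_lt_of_le h0 with h | h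
  · rw [← h]; decide
  · have hk : 0 < s.toNat := by omega
    have hs : -s = -((s.toNat : Nat) : Int) := by omega
    rw [pvRowB, hs, PySem.List.slice_from_neg_natCast _ _ hk,
        PySem.List.slice_to_neg_natCast _ _ hk,
        List.rotate_eq_drop_append_take (by rw [hlen2]; omega), hlen2]

lemma rowB_getD (s : Int) (h0 : 0 ≤ s) (h25 : s ≤ 25) (i : Nat) (hi : i < 26) (d : Char) :
    (pvRowB s).getD i d = Char.ofNat (((↑i - s) % 26).toNat + 65) := by
  obtain ⟨t, rfl⟩ : ∃ t : Nat, s = (t : Int) := ⟨s.toNat, by omega⟩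
  rw [pvRowB_eq_rotate _ h0 h25]
  have hlen2 : pvABC.length = 26 := by decide
  have hlen : (pvABC.rotate (26 - (t:Int).toNat)).length = 26 := by rw [List.length_rotate, hlen2]
  rw [List.getD_eq_getElem _ _ (by omega)]
  rw [List.getElem_rotate]
  have h1 : 0 ≤ ((i:Int)-(t:Int)) % 26 := Int.emod_nonneg _ (by norm_num)
  have h2 : ((i:Int)-(t:Int)) % 26 < 26 := Int.emod_lt_of_pos _ (by norm_num)
  have hmod : (i + (26 - (t:Int).toNat)) % pvABC.length = (((i : Int) - (t:Int)) % 26).toNat := by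
    rw [hlen2]; omega
  have hget : pvABC[(i + (26 - (t:Int).toNat)) % pvABC.length]'(by rw [hlen2]; omega)
      = pvABC.getD ((i + (26 - (t:Int).toNat)) % pvABC.length) 'A' :=
    (List.getD_eq_getElem _ _ (by rw [hlen2]; omega)).symm
  rw [hget, hmod, pvABC_get ⟨(((i : Int) - (t:Int)) % 26).toNat, by omega⟩]
  simp [Nat.add_comm]

lemma lowerChar_ofNat : ∀ m : Fin 26,
    PySem.Chars.lowerChar (Char.ofNat ((m : Nat) + 65)) = Char.ofNat ((m : Nat) + 97) := by decide

-- per-character agreement, uppercase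
lemma charU (c : Char) (hU : PySem.Chars.isupper c = true) (s : Int) (h0 : 0 ≤ s) (h25 : s ≤ 25) :
    (pvRowB s).getD (c.toNat - 65) c
      = Char.ofNat ((PySem.Int.mod ((c.toNat : Int) - 65 - s) 26 + 65).toNat) := by
  have hc : 65 ≤ c.toNat ∧ c.toNat ≤ 90 := by
    simp [PySem.Chars.isupper, Char.le_def] at hU; exact hU
  rw [rowB_getD s h0 h25 (c.toNat - 65) (by omega) c]
  congr 1
  rw [PySem.Int.mod_eq_emod_of_pos (by norm_num)]
  have h1 : 0 ≤ ((c.toNat : Int) - 65 - s) % 26 := Int.emod_nonneg _ (by norm_num)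
  omega

-- per-character agreement, lowercase
lemma charL (c : Char) (hL : PySem.Chars.islower c = true) (s : Int) (h0 : 0 ≤ s) (h25 : s ≤ 25) :
    PySem.Chars.lowerChar ((pvRowB s).getD (c.toNat - 97) c)
      = Char.ofNat ((PySem.Int.mod ((c.toNat : Int) - 97 - s) 26 + 97).toNat) := by
  have hc : 97 ≤ c.toNat ∧ c.toNat ≤ 122 := by
    simp [PySem.Chars.islower, Char.le_def] at hL; exact hL
  rw [rowB_getD s h0 h25 (c.toNat - 97) (by omega) c]
  have hcast : ((c.toNat - 97 : Nat) : Int) = (c.toNat : Int) - 97 := by omega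
  rw [hcast]
  have h1 : 0 ≤ ((c.toNat : Int) - 97 - s) % 26 := Int.emod_nonneg _ (by norm_num)
  have h2 : ((c.toNat : Int) - 97 - s) % 26 < 26 := Int.emod_lt_of_pos _ (by norm_num)
  rw [lowerChar_ofNat ⟨(((c.toNat : Int) - 97 - s) % 26).toNat, by omega⟩]
  have hfv : ((⟨(((c.toNat : Int) - 97 - s) % 26).toNat, by omega⟩ : Fin 26) : Nat)
      = (((c.toNat : Int) - 97 - s) % 26).toNat := rfl
  rw [hfv]
  congr 1
  rw [PySem.Int.mod_eq_emod_of_pos (by norm_num)]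
  omega

-- the two loops agree, given key shifts in [0,25]
lemma encA_eq_encB (shifts : List Int) (hne : shifts ≠ [])
    (hb : ∀ s ∈ shifts, 0 ≤ s ∧ s ≤ 25) (cs : List Char) (j : Nat) :
    pvEncA (cs.zip (pvStreamA shifts cs j)) = pvEncB (shifts.map pvRowB) cs j := by
  have hn : 0 < shifts.length := List.length_pos_iff.mpr hne
  induction cs generalizing j with
  | nil => rfl
  | cons c cs ih =>
    have hrow : (shifts.map pvRowB).getD (j % (shifts.map pvRowB).length) []
        = pvRowB (shifts.getD (j % shifts.length) 0) := by
      rw [List.length_map, List.getD_eq_getElem _ _ (by simpa using Nat.mod_lt _ hn),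
          List.getD_eq_getElem _ _ (Nat.mod_lt _ hn), List.getElem_map]
    have hs : shifts.getD (j % shifts.length) 0 ∈ shifts := by
      rw [List.getD_eq_getElem _ _ (Nat.mod_lt _ hn)]; exact List.getElem_mem _
    obtain ⟨hs0, hs25⟩ := hb _ hs
    by_cases hU : PySem.Chars.isupper c
    · have hA : PySem.Chars.isalpha c = true := by simp [PySem.Chars.isalpha, hU]
      have hU' : (decide ('A' ≤ c) && decide (c ≤ 'Z')) = true := by
        simpa [PySem.Chars.isupper] using hU
      simp only [pvStreamA, hA, if_true, List.zip_cons_cons, pvEncA, pvEncB, hU, hU']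
      rw [hrow, charU c hU _ hs0 hs25, ih]
    · by_cases hL : PySem.Chars.islower c
      · have hA : PySem.Chars.isalpha c = true := by simp [PySem.Chars.isalpha, hL]
        have hU' : (decide ('A' ≤ c) && decide (c ≤ 'Z')) = false := by
          simpa [PySem.Chars.isupper] using hU
        have hL' : (decide ('a' ≤ c) && decide (c ≤ 'z')) = true := by
          simpa [PySem.Chars.islower] using hL
        simp only [pvStreamA, hA, if_true, List.zip_cons_cons, pvEncA, pvEncB,
          hU', hL', Bool.false_eq_true, if_false]
        rw [if_neg (by simp [hU]), hrow, charL c hL _ hs0 hs25, ih]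
      · have hA : PySem.Chars.isalpha c = false := by
          simp [PySem.Chars.isalpha, hU, hL]
        have hU' : (decide ('A' ≤ c) && decide (c ≤ 'Z')) = false := by
          simpa [PySem.Chars.isupper] using hU
        have hL' : (decide ('a' ≤ c) && decide (c ≤ 'z')) = false := by
          simpa [PySem.Chars.islower] using hL
        simp only [pvStreamA, hA, Bool.false_eq_true, if_false, List.zip_cons_cons,
          pvEncA, pvEncB, hU', hL']
        rw [ih]

-- key shifts are in [0,25]
lemma shifts_bounds (key : List Char) :
    ∀ s ∈ (pvCleanKeyA key).map (fun c => (c.toNat : Int) - 65), 0 ≤ s ∧ s ≤ 25 := by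
  intro s hs
  obtain ⟨c, hc, rfl⟩ := List.mem_map.mp hs
  have := List.of_mem_filter hc
  have hc' : 65 ≤ c.toNat ∧ c.toNat ≤ 90 := by
    simp [Char.le_def] at this; exact this
  omega

-- a key with a letter yields a nonempty cleaned key
lemma cleanKey_ne (key : List Char) (h : key.any PySem.Chars.isalpha = true) :
    pvCleanKeyA key ≠ [] := by
  obtain ⟨c, hc, hca⟩ := List.any_eq_true.mp h
  intro hnil
  have hm : PySem.Chars.upperChar c ∈ PySem.Chars.upper key :=
    List.mem_map.mpr ⟨c, hc, rfl⟩
  have hup : (decide ('A' ≤ PySem.Chars.upperChar c) && decide (PySem.Chars.upperChar c ≤ 'Z')) = true := by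
    have hor : PySem.Chars.isupper c = true ∨ PySem.Chars.islower c = true := by
      simpa [PySem.Chars.isalpha, Bool.or_eq_true] using hca
    rcases hor with hU | hL
    · have hc2 : 65 ≤ c.toNat ∧ c.toNat ≤ 90 := by
        simp [PySem.Chars.isupper, Char.le_def] at hU; exact hU
      have hc3 : 65 ≤ c.val.toNat ∧ c.val.toNat ≤ 90 := hc2
      have hLf : PySem.Chars.islower c = false := by
        simp [PySem.Chars.islower, Char.le_def, UInt32.le_iff_toNat_le]; omega
      simp [PySem.Chars.upperChar, hLf, Char.le_def, UInt32.le_iff_toNat_le]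
      omega
    · have hc2 : 97 ≤ c.toNat ∧ c.toNat ≤ 122 := by
        simp [PySem.Chars.islower, Char.le_def] at hL; exact hL
      have hvt : (Char.ofNat (c.toNat - 32)).toNat = c.toNat - 32 :=
        charToNat_ofNat _ (by omega)
      have hv2 : 65 ≤ (Char.ofNat (c.toNat - 32)).val.toNat
          ∧ (Char.ofNat (c.toNat - 32)).val.toNat ≤ 90 := by
        show 65 ≤ (Char.ofNat (c.toNat - 32)).toNat ∧ (Char.ofNat (c.toNat - 32)).toNat ≤ 90
        rw [hvt]; omega
      simp [PySem.Chars.upperChar, hL, Char.le_def, UInt32.le_iff_toNat_le]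
      omega
  have hmem : PySem.Chars.upperChar c ∈ pvCleanKeyA key := List.mem_filter.mpr ⟨hm, hup⟩
  rw [hnil] at hmem
  exact List.not_mem_nil hmem

-- ===== VERDICT (by name: the statement is the Claim_ definition above) =====
theorem variant_beaufort_encrypt_spec : Claim_equal_variant_beaufort_encrypt := by
  intro text key _ hpre
  have hne : (pvCleanKeyA key.toList).map (fun c => (c.toNat : Int) - 65) ≠ [] := by
    simp [cleanKey_ne key.toList hpre]
  show String.mk (pvEncA (text.toList.zip
      (pvStreamA ((pvCleanKeyA key.toList).map (fun c => (c.toNat : Int) - 65)) text.toList 0)))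
    = String.mk (pvEncB (((pvCleanKeyA key.toList).map (fun c => (c.toNat : Int) - 65)).map pvRowB)
        text.toList 0)
  rw [encA_eq_encB _ hne (shifts_bounds key.toList) text.toList 0]
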